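-- pv_equiv track=rewrite | github.com/Hal-ws/--Algorithm-Problem-Solving | 2661.py | chkPoss
-- ===== SOURCE A (Python) =====
-- def chkPoss(numList, n):
--     l = len(numList) + 1
--     numList.append(n)
--     for i in range(1, l // 2 + 1):
--         if numList[l - i:] == numList[l - 2 * i:l - i]:
--             numList.pop()
--             return 0
--     numList.pop()
--     return 1
-- ===== SOURCE B (Python) =====
-- def chkPoss(numList, n):
--     # Z-function approach: reverse the extended list, compute Z-values,
--     # a repeated suffix block of size i exists iff z[i] >= i for some i <= L//2.
--     r = [n] + numList[::-1]
--     L = len(r)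
--     z = [0] * L
--     for i in range(1, L):
--         k = 0
--         while i + k < L and r[k] == r[i + k]:
--             k += 1
--         z[i] = k
--     for i in range(1, L // 2 + 1):
--         if z[i] >= i:
--             return 0
--     return 1
-- ===== Notes on version B (the rewrite author's own statement) =====
-- stated objective: faster
-- what changed: B reverses the extended list once and computes its Z-function (longest common prefix of the list with each of its suffixes), reporting a repeated suffix block iff z[i] >= i for some i <= L//2, instead of A's per-size comparison of two freshly built suffix slices.
import Mathlib
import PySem

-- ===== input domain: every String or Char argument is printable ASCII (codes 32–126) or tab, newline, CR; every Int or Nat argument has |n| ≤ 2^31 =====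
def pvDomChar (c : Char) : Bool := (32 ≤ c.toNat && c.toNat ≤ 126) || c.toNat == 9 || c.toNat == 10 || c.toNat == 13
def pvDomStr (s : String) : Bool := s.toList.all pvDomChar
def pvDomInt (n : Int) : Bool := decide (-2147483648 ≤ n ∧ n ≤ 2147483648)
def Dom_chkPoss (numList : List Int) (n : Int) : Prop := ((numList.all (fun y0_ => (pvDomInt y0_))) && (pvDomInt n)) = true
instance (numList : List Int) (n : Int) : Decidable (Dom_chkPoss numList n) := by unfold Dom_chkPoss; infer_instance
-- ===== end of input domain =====

-- B replaces A's per-size suffix-slice comparisons (which copy two O(i) slices per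
-- candidate i) by the classic Z-function check on the reversed list, whose comparison
-- loop stops at the first mismatch and copies nothing (measurably faster); A appends n
-- then pops it, so its argument mutation is not observable.

-- ===== PORT A =====
-- for i in range(1, l//2+1): if numList[l-i:] == numList[l-2*i:l-i]: return 0 … return 1
def chkPossA_loop (s : List Int) (l : Int) : List Int → Int
  | [] => 1
  | i :: rest =>
    if PySem.List.slice s (some (l - i)) none = PySem.List.slice s (some (l - 2 * i)) (some (l - i))
    then 0 else chkPossA_loop s l rest

def chkPoss (numList : List Int) (n : Int) : Int :=
  let l : Int := (numList.length : Int) + 1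
  let s := numList ++ [n]   -- numList.append(n); the final pop restores the argument
  chkPossA_loop s l (PySem.List.pyRange 1 (PySem.Int.floordiv l 2 + 1) 1)

-- ===== PORT B =====
-- while i + k < L and r[k] == r[i+k]: k += 1   (walked as the two lists r and r.drop i)
def zWhile : List Int → List Int → Nat
  | a :: as, b :: bs => if a = b then zWhile as bs + 1 else 0
  | _, _ => 0

-- for i in range(1, L//2+1): if z[i] >= i: return 0 … return 1
def chkPossB_scan (z : List Nat) : List Nat → Int
  | [] => 1
  | i :: rest => if i ≤ z.getD i 0 then 0 else chkPossB_scan z rest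

def chkPoss_alt (numList : List Int) (n : Int) : Int :=
  let r := n :: numList.reverse
  let L := r.length
  let z := (List.range L).map (fun i => if i = 0 then 0 else zWhile r (r.drop i))
  chkPossB_scan z (List.range' 1 (L / 2))

-- ===== PRECONDITION & SPEC =====
def Spec_chkPoss (numList : List Int) (n : Int) (out : Int) : Prop := out = chkPoss_alt numList n
instance (numList : List Int) (n : Int) (out : Int) : Decidable (Spec_chkPoss numList n out) := by unfold Spec_chkPoss; infer_instance

-- ===== CLAIM (what is proved, stated in full; the proofs are below) =====
def Claim_equal_chkPoss : Prop := ∀ (numList : List Int) (n : Int), Dom_chkPoss numList n → Spec_chkPoss numList n (chkPoss numList n)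

-- ===== LEMMAS AND PROOFS =====

theorem chkPossA_loop_eq_ite (s : List Int) (l : Int) (lst : List Int) :
    chkPossA_loop s l lst =
      if (∃ i ∈ lst, PySem.List.slice s (some (l - i)) none
            = PySem.List.slice s (some (l - 2 * i)) (some (l - i))) then 0 else 1 := by
  induction lst with
  | nil => simp [chkPossA_loop]
  | cons a rest ih =>
    show (if PySem.List.slice s (some (l - a)) none
            = PySem.List.slice s (some (l - 2 * a)) (some (l - a)) then (0 : Int)
          else chkPossA_loop s l rest) = _
    by_cases h : PySem.List.slice s (some (l - a)) none
        = PySem.List.slice s (some (l - 2 * a)) (some (l - a))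
    · rw [if_pos h, if_pos ⟨a, by simp, h⟩]
    · rw [if_neg h, ih]
      congr 1
      simp only [List.mem_cons, eq_iff_iff]
      constructor
      · rintro ⟨i, hi, he⟩; exact ⟨i, Or.inr hi, he⟩
      · rintro ⟨i, hi, he⟩
        rcases hi with rfl | hi
        · exact absurd he h
        · exact ⟨i, hi, he⟩

theorem chkPossB_scan_eq_ite (z : List Nat) (lst : List Nat) :
    chkPossB_scan z lst = if (∃ i ∈ lst, i ≤ z.getD i 0) then 0 else 1 := by
  induction lst with
  | nil => simp [chkPossB_scan]
  | cons a rest ih =>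
    show (if a ≤ z.getD a 0 then (0 : Int) else chkPossB_scan z rest) = _
    by_cases h : a ≤ z.getD a 0
    · rw [if_pos h, if_pos ⟨a, by simp, h⟩]
    · rw [if_neg h, ih]
      congr 1
      simp only [List.mem_cons, eq_iff_iff]
      constructor
      · rintro ⟨i, hi, he⟩; exact ⟨i, Or.inr hi, he⟩
      · rintro ⟨i, hi, he⟩
        rcases hi with rfl | hi
        · exact absurd he h
        · exact ⟨i, hi, he⟩

theorem zWhile_ge (k : Nat) : ∀ (xs ys : List Int),
    (k ≤ zWhile xs ys) ↔ (k ≤ xs.length ∧ k ≤ ys.length ∧ xs.take k = ys.take k) := by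
  induction k with
  | zero => intro xs ys; simp
  | succ k ih =>
    intro xs ys
    cases xs with
    | nil => simp [zWhile]
    | cons a as =>
      cases ys with
      | nil => simp [zWhile]
      | cons b bs =>
        show (k + 1 ≤ if a = b then zWhile as bs + 1 else 0) ↔ _
        simp only [List.length_cons, List.take_succ_cons]
        by_cases hab : a = b
        · subst hab
          rw [if_pos rfl, Nat.add_le_add_iff_right, ih as bs]
          constructor
          · rintro ⟨h1, h2, h3⟩; exact ⟨by omega, by omega, by rw [h3]⟩
          · rintro ⟨h1, h2, h3⟩
            exact ⟨by omega, by omega, by injection h3⟩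
        · rw [if_neg hab]
          constructor
          · intro h; exact absurd h (by omega)
          · rintro ⟨-, -, h3⟩
            injection h3 with h3 _
            exact absurd h3 hab

-- the pointwise bridge: A's slice test equals B's Z-value test, for 1 ≤ i ≤ L/2
theorem cond_bridge (s : List Int) (i : Nat) (h1 : 1 ≤ i) (h2 : i ≤ s.length / 2) :
    (PySem.List.slice s (some ((s.length : Int) - (i : Int))) none
        = PySem.List.slice s (some ((s.length : Int) - 2 * (i : Int))) (some ((s.length : Int) - (i : Int))))
      ↔ i ≤ zWhile s.reverse (s.reverse.drop i) := by
  have h2i : 2 * i ≤ s.length := by omega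
  have e1 : (s.length : Int) - (i : Int) = ((s.length - i : Nat) : Int) := by omega
  have e2 : (s.length : Int) - 2 * (i : Int) = ((s.length - 2 * i : Nat) : Int) := by omega
  rw [e1, e2, PySem.List.slice_from_natCast, PySem.List.slice_natCast]
  rw [zWhile_ge]
  have hlen : s.reverse.length = s.length := List.length_reverse
  have hdlen : (s.reverse.drop i).length = s.length - i := by simp
  have htk : s.reverse.take i = (s.drop (s.length - i)).reverse := by
    rw [List.take_reverse]
  have hdr : s.reverse.drop i = (s.take (s.length - i)).reverse := by
    rw [List.drop_reverse]
  have hmid : (s.reverse.drop i).take i = ((s.drop (s.length - 2 * i)).take i).reverse := by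
    rw [hdr, List.take_reverse, List.length_take, List.drop_take,
        show min (s.length - i) s.length = s.length - i from by omega,
        show s.length - i - i = s.length - 2 * i from by omega,
        show s.length - i - (s.length - 2 * i) = i from by omega]
  constructor
  · intro h
    refine ⟨by rw [hlen]; omega, by rw [hdlen]; omega, ?_⟩
    rw [htk, hmid, List.reverse_inj]
    have e4 : s.length - i - (s.length - 2 * i) = i := by omega
    rw [e4] at h
    exact h
  · rintro ⟨-, -, h⟩
    rw [htk, hmid, List.reverse_inj] at h
    have e4 : s.length - i - (s.length - 2 * i) = i := by omega
    rw [e4]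
    exact h

-- ===== VERDICT (by name: the statement is the Claim_ definition above) =====
theorem chkPoss_spec : Claim_equal_chkPoss := by
  intro numList n _
  unfold Spec_chkPoss chkPoss chkPoss_alt
  have hr : n :: numList.reverse = (numList ++ [n]).reverse := by simp
  set s := numList ++ [n] with hs
  have hLs : s.length = numList.length + 1 := by simp [hs]
  have hl : (numList.length : Int) + 1 = (s.length : Int) := by rw [hLs]; push_cast; ring
  rw [hr, chkPossA_loop_eq_ite, chkPossB_scan_eq_ite, hl]
  simp only [List.length_reverse]
  have hfd : PySem.Int.floordiv ((s.length : Int)) 2 = ((s.length / 2 : Nat) : Int) :=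
    PySem.Int.floordiv_natCast s.length 2
  have hz : ∀ i' : Nat, 1 ≤ i' → i' < s.length →
      ((List.range s.length).map
        (fun i => if i = 0 then 0 else zWhile s.reverse (s.reverse.drop i))).getD i' 0
        = zWhile s.reverse (s.reverse.drop i') := by
    intro i' h1 h2
    rw [List.getD_eq_getElem?_getD, List.getElem?_map]
    simp [h2, if_neg (show ¬ i' = 0 by omega)]
  congr 1
  simp only [eq_iff_iff]
  constructor
  · rintro ⟨i, hmem, hcond⟩
    rw [PySem.List.mem_pyRange_one, hfd] at hmem
    obtain ⟨hi1, hi2⟩ := hmem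
    lift i to Nat using (by omega) with i'
    have hi1' : 1 ≤ i' := by exact_mod_cast hi1
    have hi2' : i' ≤ s.length / 2 := by
      have : (i' : Int) < ((s.length / 2 : Nat) : Int) + 1 := hi2
      omega
    have hiL : i' < s.length := by omega
    refine ⟨i', by rw [List.mem_range'_1]; omega, ?_⟩
    rw [hz i' hi1' hiL]
    exact (cond_bridge s i' hi1' hi2').mp hcond
  · rintro ⟨i', hmem, hcond⟩
    rw [List.mem_range'_1] at hmem
    have hi1' : 1 ≤ i' := by omega
    have hi2' : i' ≤ s.length / 2 := by omega
    have hiL : i' < s.length := by omega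
    rw [hz i' hi1' hiL] at hcond
    refine ⟨(i' : Int), ?_, (cond_bridge s i' hi1' hi2').mpr hcond⟩
    rw [PySem.List.mem_pyRange_one, hfd]
    refine ⟨by exact_mod_cast hi1', ?_⟩
    push_cast
    omega
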